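-- pv_equiv track=rewrite | github.com/yanez-compliance/MIID-subnet | MIID/validator/rule_evaluator.py | is_letters_swapped
-- ===== SOURCE A (Python) =====
-- def is_letters_swapped(original: str, variation: str) -> bool:
--     """Check if some adjacent letters are swapped"""
--     if len(original) != len(variation) or original == variation:
--         return False
--
--     diffs = []
--     for i in range(len(original)):
--         if original[i] != variation[i]:
--             diffs.append(i)
--
--     if len(diffs) != 2 or abs(diffs[0] - diffs[1]) != 1:
--         return False
--
--     return (original[diffs[0]] == variation[diffs[1]] and
--             original[diffs[1]] == variation[diffs[0]])
-- ===== SOURCE B (Python) =====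
-- def is_letters_swapped(original: str, variation: str) -> bool:
--     """Check if some adjacent letters are swapped"""
--     if len(original) != len(variation) or original == variation:
--         return False
--     return any(
--         original[:i] + original[i + 1] + original[i] + original[i + 2:] == variation
--         for i in range(len(original) - 1)
--     )
-- ===== Notes on version B (the rewrite author's own statement) =====
-- stated objective: simpler
-- what changed: Instead of collecting the list of differing indices and checking it is an adjacent pair with crossed characters, B directly tests for each position i whether swapping characters i and i+1 of original yields variation.
import Mathlib
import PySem

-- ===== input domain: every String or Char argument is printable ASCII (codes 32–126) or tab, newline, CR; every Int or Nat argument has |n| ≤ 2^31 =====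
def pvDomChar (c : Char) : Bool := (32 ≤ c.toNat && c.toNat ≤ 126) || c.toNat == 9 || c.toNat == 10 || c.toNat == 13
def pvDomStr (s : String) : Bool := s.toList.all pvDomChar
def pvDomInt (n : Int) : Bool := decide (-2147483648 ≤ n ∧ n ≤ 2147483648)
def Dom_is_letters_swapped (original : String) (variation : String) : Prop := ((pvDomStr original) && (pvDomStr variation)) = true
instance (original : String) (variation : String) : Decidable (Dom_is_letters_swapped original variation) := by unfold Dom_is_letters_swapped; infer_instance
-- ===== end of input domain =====

-- B replaces A's diff-index collection and adjacency check by directly testing each adjacent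
-- transposition of `original` against `variation` (objective: simpler; not faster).
-- ===== PORT A =====
-- literal transliteration of A: collect differing indices, then check adjacency and cross equality
def is_letters_swapped (original : String) (variation : String) : Bool :=
  let o := original.toList
  let v := variation.toList
  if o.length ≠ v.length ∨ o = v then false
  else
    let diffs := (List.range o.length).foldl
      (fun acc i => if o.getD i default ≠ v.getD i default then acc ++ [i] else acc) []
    if diffs.length ≠ 2 ∨ ((diffs.getD 0 0 : Int) - (diffs.getD 1 0 : Int)).natAbs ≠ 1 then false
    else decide (o.getD (diffs.getD 0 0) default = v.getD (diffs.getD 1 0) default ∧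
                 o.getD (diffs.getD 1 0) default = v.getD (diffs.getD 0 0) default)

-- ===== PORT B =====
-- literal transliteration of B: test each adjacent transposition of original against variation
-- (Python slices original[:i] and original[i+2:] with 0 ≤ i, i+2 ≤ len are exactly take/drop)
def is_letters_swapped_alt (original : String) (variation : String) : Bool :=
  let o := original.toList
  let v := variation.toList
  if o.length ≠ v.length ∨ o = v then false
  else
    (List.range (o.length - 1)).any
      (fun i => o.take i ++ [o.getD (i + 1) default, o.getD i default] ++ o.drop (i + 2) = v)


-- ===== PRECONDITION & SPEC =====
def Spec_is_letters_swapped (original : String) (variation : String) (out : Bool) : Prop := out = is_letters_swapped_alt original variation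
instance (original : String) (variation : String) (out : Bool) : Decidable (Spec_is_letters_swapped original variation out) := by unfold Spec_is_letters_swapped; infer_instance

-- ===== CLAIM (what is proved, stated in full; the proofs are below) =====
def Claim_equal_is_letters_swapped : Prop := ∀ (original : String) (variation : String), Dom_is_letters_swapped original variation → Spec_is_letters_swapped original variation (is_letters_swapped original variation)

-- ===== LEMMAS AND PROOFS =====

lemma pv_eq_of_getD (o v : List Char) (hl : o.length = v.length)
    (h : ∀ j, j < o.length → o.getD j default = v.getD j default) : o = v := by
  apply List.ext_getElem hl
  intro j h1 h2
  have := h j h1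
  rwa [List.getD_eq_getElem o default h1, List.getD_eq_getElem v default h2] at this

lemma pv_swap_getD (o : List Char) (i j : Nat) (hi : i + 1 < o.length) (hj : j < o.length) :
    (o.take i ++ [o.getD (i + 1) default, o.getD i default] ++ o.drop (i + 2)).getD j default =
    if j = i then o.getD (i + 1) default
    else if j = i + 1 then o.getD i default
    else o.getD j default := by
  have hti : (o.take i).length = i := by simp; omega
  have htl : (o.take i ++ [o.getD (i + 1) default, o.getD i default] ++ o.drop (i + 2)).length
      = o.length := by simp; omega
  have hlen2 : (o.take i ++ [o.getD (i + 1) default, o.getD i default]).length = i + 2 := by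
    simp only [List.length_append, hti, List.length_cons, List.length_nil]
  rw [List.getD_eq_getElem _ _ (htl ▸ hj)]
  by_cases h1 : j < i
  · rw [if_neg (by omega), if_neg (by omega), List.getD_eq_getElem _ _ hj]
    rw [List.getElem_append_left (by omega), List.getElem_append_left (by omega)]
    simp [List.getElem_take]
  · by_cases h2 : j = i
    · subst h2
      rw [if_pos rfl]
      rw [List.getElem_append_left (by omega), List.getElem_append_right (by omega)]
      simp [hti]
    · by_cases h3 : j = i + 1
      · subst h3
        rw [if_neg h2, if_pos rfl]
        rw [List.getElem_append_left (by omega), List.getElem_append_right (by omega)]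
        simp [hti]
      · rw [if_neg h2, if_neg h3, List.getD_eq_getElem _ _ hj]
        rw [List.getElem_append_right (by omega)]
        simp only [List.getElem_drop]
        congr 1
        omega

lemma pv_swap_eq_iff (o v : List Char) (hl : o.length = v.length) (i : Nat)
    (hi : i + 1 < o.length) :
    (o.take i ++ [o.getD (i + 1) default, o.getD i default] ++ o.drop (i + 2) = v) ↔
    ((∀ j, j < o.length → j ≠ i → j ≠ i + 1 → o.getD j default = v.getD j default) ∧
     v.getD i default = o.getD (i + 1) default ∧
     v.getD (i + 1) default = o.getD i default) := by
  have htl : (o.take i ++ [o.getD (i + 1) default, o.getD i default] ++ o.drop (i + 2)).length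
      = o.length := by simp; omega
  constructor
  · intro h
    refine ⟨?_, ?_, ?_⟩
    · intro j hj hji hji1
      have := pv_swap_getD o i j hi hj
      rw [h, if_neg hji, if_neg hji1] at this
      exact this.symm
    · have := pv_swap_getD o i i hi (by omega)
      rw [h, if_pos rfl] at this; exact this
    · have := pv_swap_getD o i (i + 1) hi hi
      rw [h, if_neg (by omega), if_pos rfl] at this; exact this
  · rintro ⟨hag, hc1, hc2⟩
    apply pv_eq_of_getD _ _ (htl.trans hl)
    intro j hj
    rw [htl] at hj
    rw [pv_swap_getD o i j hi hj]
    by_cases h2 : j = i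
    · subst h2; rw [if_pos rfl]; exact hc1.symm
    · by_cases h3 : j = i + 1
      · subst h3; rw [if_neg h2, if_pos rfl]; exact hc2.symm
      · rw [if_neg h2, if_neg h3]; exact hag j hj h2 h3

lemma pv_filt_nil (i n : Nat) (h : n ≤ i) :
    (List.range n).filter (fun j => j == i || j == i + 1) = [] := by
  rw [List.filter_eq_nil_iff]
  intro j hj
  simp only [List.mem_range] at hj
  simp only [Bool.or_eq_true, beq_iff_eq, not_or]
  omega

lemma pv_filt_one (i : Nat) :
    (List.range (i + 1)).filter (fun j => j == i || j == i + 1) = [i] := by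
  rw [List.range_succ, List.filter_append, pv_filt_nil i i le_rfl]
  simp

lemma pv_filt_pair (i n : Nat) (h : i + 1 < n) :
    (List.range n).filter (fun j => j == i || j == i + 1) = [i, i + 1] := by
  induction n with
  | zero => omega
  | succ n ih =>
    rw [List.range_succ, List.filter_append]
    by_cases h' : i + 1 < n
    · rw [ih h']
      have h1 : (n == i) = false := by simp; omega
      have h2 : (n == i + 1) = false := by simp; omega
      simp [h1, h2]
    · have hn : n = i + 1 := by omega
      subst hn
      rw [pv_filt_one i]
      simp

lemma pv_inner_eq (o v : List Char) (hl : o.length = v.length) (hne : o ≠ v) :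
    (let diffs := (List.range o.length).foldl
        (fun acc i => if o.getD i default ≠ v.getD i default then acc ++ [i] else acc) [];
     if diffs.length ≠ 2 ∨ ((diffs.getD 0 0 : Int) - (diffs.getD 1 0 : Int)).natAbs ≠ 1 then false
     else decide (o.getD (diffs.getD 0 0) default = v.getD (diffs.getD 1 0) default ∧
                  o.getD (diffs.getD 1 0) default = v.getD (diffs.getD 0 0) default)) =
    (List.range (o.length - 1)).any
      (fun i => o.take i ++ [o.getD (i + 1) default, o.getD i default] ++ o.drop (i + 2) = v) := by
  simp only [PySem.List.foldl_append_ite_eq_filter, List.nil_append]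
  set q : Nat → Bool := fun j => decide (o.getD j default ≠ v.getD j default) with hq
  rw [Bool.eq_iff_iff]
  constructor
  · -- A = true → B = true
    intro hA
    by_cases hc : ((List.range o.length).filter q).length ≠ 2 ∨
        (((((List.range o.length).filter q).getD 0 0 : Nat) : Int) -
         ((((List.range o.length).filter q).getD 1 0 : Nat) : Int)).natAbs ≠ 1
    · rw [if_pos hc] at hA; exact absurd hA (by simp)
    · rw [if_neg hc] at hA
      push Not at hc
      obtain ⟨hlen2, habs⟩ := hc
      obtain ⟨a, b, hab⟩ := List.length_eq_two.mp hlen2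
      have hsorted : a < b := by
        have hp : ((List.range o.length).filter q).Pairwise (· < ·) :=
          (List.pairwise_lt_range).filter q
        rw [hab] at hp
        exact (List.pairwise_cons.mp hp).1 b (by simp)
      have hb : b = a + 1 := by
        rw [hab] at habs
        simp only [List.getD_cons_zero, List.getD_cons_succ] at habs
        omega
      subst hb
      have hmemb : a + 1 ∈ (List.range o.length).filter q := by rw [hab]; simp
      have hbn : a + 1 < o.length := by
        have := (List.mem_filter.mp hmemb).1
        simpa using this
      rw [hab] at hA
      simp only [List.getD_cons_zero, List.getD_cons_succ] at hA
      rw [decide_eq_true_iff] at hA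
      obtain ⟨hx1, hx2⟩ := hA
      rw [List.any_eq_true]
      refine ⟨a, List.mem_range.mpr (by omega), ?_⟩
      rw [decide_eq_true_iff]
      rw [pv_swap_eq_iff o v hl a hbn]
      refine ⟨?_, hx2.symm, hx1.symm⟩
      intro j hj hji hji1
      by_contra hcon
      have hjmem : j ∈ (List.range o.length).filter q := by
        rw [List.mem_filter]
        exact ⟨List.mem_range.mpr hj, decide_eq_true hcon⟩
      rw [hab] at hjmem
      simp at hjmem
      omega
  · -- B = true → A = true
    intro hB
    rw [List.any_eq_true] at hB
    obtain ⟨i, hmem, heq⟩ := hB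
    rw [List.mem_range] at hmem
    have hi1 : i + 1 < o.length := by omega
    rw [decide_eq_true_iff, pv_swap_eq_iff o v hl i hi1] at heq
    obtain ⟨hag, hc1, hc2⟩ := heq
    have hdi : o.getD i default ≠ v.getD i default := by
      intro h
      apply hne
      apply pv_eq_of_getD o v hl
      intro j hj
      by_cases h2 : j = i
      · subst h2; exact h
      · by_cases h3 : j = i + 1
        · subst h3
          rw [hc2, ← hc1]
          exact h.symm
        · exact hag j hj h2 h3
    have hdi1 : o.getD (i + 1) default ≠ v.getD (i + 1) default := by
      intro h
      apply hdi
      have e1 : o.getD (i + 1) default = o.getD i default := h.trans hc2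
      exact e1.symm.trans hc1.symm
    have hfilt : (List.range o.length).filter q = [i, i + 1] := by
      rw [List.filter_congr (q := fun j => j == i || j == i + 1) ?_]
      · exact pv_filt_pair i o.length hi1
      · intro j hjm
        rw [List.mem_range] at hjm
        show decide (o.getD j default ≠ v.getD j default) = (j == i || j == i + 1)
        by_cases h2 : j = i
        · subst h2
          rw [show ((j == j || j == j + 1 : Bool)) = true by simp]
          exact decide_eq_true hdi
        · by_cases h3 : j = i + 1
          · subst h3
            rw [show ((i + 1 == i || i + 1 == i + 1 : Bool)) = true by simp]
            exact decide_eq_true hdi1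
          · rw [show ((j == i || j == i + 1 : Bool)) = false by simp [h2, h3]]
            exact decide_eq_false (not_not_intro (hag j hjm h2 h3))
    rw [hfilt]
    rw [if_neg (by simp)]
    simp only [List.getD_cons_zero, List.getD_cons_succ]
    rw [decide_eq_true_iff]
    exact ⟨hc2.symm, hc1.symm⟩

-- ===== VERDICT (by name: the statement is the Claim_ definition above) =====
theorem is_letters_swapped_spec : Claim_equal_is_letters_swapped := by
  intro original variation _
  unfold Spec_is_letters_swapped is_letters_swapped is_letters_swapped_alt
  by_cases hg : original.toList.length ≠ variation.toList.length ∨ original.toList = variation.toList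
  · simp only [if_pos hg]
  · simp only [if_neg hg]
    push Not at hg
    exact pv_inner_eq _ _ hg.1 hg.2
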